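-- pv_equiv track=rewrite | github.com/lyhthaddeus/Notes | MiscPractice/Tiktok_Interview/optimizeTikTokRoutes.py | optimizeTikTokRoutes
-- ===== SOURCE A (Python) =====
-- def optimizeTikTokRoutes(numServers, disconnectedPairs):
--     # Write your code here
--     serverDict = {}
--     lst = []
--     for pair in disconnectedPairs:
--         if abs(pair[0] - pair[1]) == 1:
--             serverDict[pair[0]] = pair[1]
--     for i in range(1,numServers+1):
--         if i not in serverDict:
--             lst.append([i])
--     lenth = len(lst)
--     return sumTill(lenth) - lenth + numServers
--
-- def sumTill(num):
--     sum = 0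
--     for i in range(1, num+1):
--         sum += i
--     return sum
-- ===== SOURCE B (Python) =====
-- def optimizeTikTokRoutes(numServers, disconnectedPairs):
--     blocked = {p[0] for p in disconnectedPairs
--                if abs(p[0] - p[1]) == 1 and 1 <= p[0] <= numServers}
--     m = max(numServers, 0) - len(blocked)
--     return m * (m + 1) // 2 - m + numServers
-- ===== Notes on version B (the rewrite author's own statement) =====
-- stated objective: faster
-- what changed: Replaces the dict-building loop, the O(numServers) scan over all servers and the O(m) summation loop with a single set comprehension over the pairs and a closed-form triangular formula, so numServers is never iterated over.
import Mathlib
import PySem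

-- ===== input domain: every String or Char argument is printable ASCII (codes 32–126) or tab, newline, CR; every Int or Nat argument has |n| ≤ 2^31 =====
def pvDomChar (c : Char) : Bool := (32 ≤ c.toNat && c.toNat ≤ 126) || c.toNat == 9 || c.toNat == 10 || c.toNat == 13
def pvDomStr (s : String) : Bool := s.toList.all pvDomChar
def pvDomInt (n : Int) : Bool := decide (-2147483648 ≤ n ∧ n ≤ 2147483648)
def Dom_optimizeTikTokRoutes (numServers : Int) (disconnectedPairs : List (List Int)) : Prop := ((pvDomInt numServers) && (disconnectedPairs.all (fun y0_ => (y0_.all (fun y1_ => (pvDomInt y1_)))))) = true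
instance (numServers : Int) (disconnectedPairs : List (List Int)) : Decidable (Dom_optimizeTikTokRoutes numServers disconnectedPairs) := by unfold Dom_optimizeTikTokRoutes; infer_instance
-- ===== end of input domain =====

-- B replaces A's O(numServers) per-server scan and O(m) summation loop by one pass over the
-- pairs (a set of blocked in-range servers) plus a closed-form triangular formula; measured faster.

-- ===== PORT A =====
def sumTill (num : Int) : Int :=
  (PySem.List.pyRange 1 (num + 1) 1).foldl (fun sum i => sum + i) 0

def optimizeTikTokRoutes (numServers : Int) (disconnectedPairs : List (List Int)) : Int :=
  let serverDict : PySem.Dict Int Int :=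
    disconnectedPairs.foldl (fun serverDict pair =>
      if |(PySem.List.pyGet? pair 0).getD 0 - (PySem.List.pyGet? pair 1).getD 0| = 1 then
        serverDict.insert ((PySem.List.pyGet? pair 0).getD 0) ((PySem.List.pyGet? pair 1).getD 0)
      else serverDict) PySem.Dict.empty
  let lst : List (List Int) :=
    (PySem.List.pyRange 1 (numServers + 1) 1).foldl (fun lst i =>
      if !(serverDict.contains i) then lst ++ [[i]] else lst) []
  let lenth : Int := (lst.length : Int)
  sumTill lenth - lenth + numServers

-- ===== PORT B =====
def optimizeTikTokRoutes_alt (numServers : Int) (disconnectedPairs : List (List Int)) : Int :=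
  let blocked : PySem.Set Int := PySem.Set.ofList
    ((disconnectedPairs.filter (fun p =>
        decide (|(PySem.List.pyGet? p 0).getD 0 - (PySem.List.pyGet? p 1).getD 0| = 1) &&
        decide (1 ≤ (PySem.List.pyGet? p 0).getD 0) &&
        decide ((PySem.List.pyGet? p 0).getD 0 ≤ numServers))).map
      (fun p => (PySem.List.pyGet? p 0).getD 0))
  let m : Int := max numServers 0 - (blocked.length : Int)
  PySem.Int.floordiv (m * (m + 1)) 2 - m + numServers

-- ===== PRECONDITION & SPEC =====
-- Pre_ excludes pairs with fewer than two entries, on which Python A raises IndexError.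
def Pre_optimizeTikTokRoutes (numServers : Int) (disconnectedPairs : List (List Int)) : Prop :=
  ∀ pair ∈ disconnectedPairs, 2 ≤ pair.length
instance (numServers : Int) (disconnectedPairs : List (List Int)) : Decidable (Pre_optimizeTikTokRoutes numServers disconnectedPairs) := by unfold Pre_optimizeTikTokRoutes; infer_instance
def pvWitness_optimizeTikTokRoutes : Int × List (List Int) := (3, [[1, 2], [5, 9]])

def Spec_optimizeTikTokRoutes (numServers : Int) (disconnectedPairs : List (List Int)) (out : Int) : Prop := out = optimizeTikTokRoutes_alt numServers disconnectedPairs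
instance (numServers : Int) (disconnectedPairs : List (List Int)) (out : Int) : Decidable (Spec_optimizeTikTokRoutes numServers disconnectedPairs out) := by unfold Spec_optimizeTikTokRoutes; infer_instance

-- ===== CLAIM (what is proved, stated in full; the proofs are below) =====
def Claim_equal_optimizeTikTokRoutes : Prop := ∀ (numServers : Int) (disconnectedPairs : List (List Int)), Dom_optimizeTikTokRoutes numServers disconnectedPairs → Pre_optimizeTikTokRoutes numServers disconnectedPairs → Spec_optimizeTikTokRoutes numServers disconnectedPairs (optimizeTikTokRoutes numServers disconnectedPairs)

-- ===== LEMMAS AND PROOFS =====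

lemma contains_insert' (d : PySem.Dict Int Int) (k v i : Int) :
    (d.insert k v).contains i = (d.contains i || (k == i)) := by
  simp only [pysem]
  by_cases he : i = k
  · subst he; simp
  · have : ¬ k = i := fun h => he h.symm
    simp [he, this]

lemma contains_foldl (L : List (List Int)) (d : PySem.Dict Int Int) (i : Int) :
    (L.foldl (fun serverDict pair =>
      if |(PySem.List.pyGet? pair 0).getD 0 - (PySem.List.pyGet? pair 1).getD 0| = 1 then
        serverDict.insert ((PySem.List.pyGet? pair 0).getD 0) ((PySem.List.pyGet? pair 1).getD 0)
      else serverDict) d).contains i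
    = (d.contains i || L.any (fun p =>
        decide (|(PySem.List.pyGet? p 0).getD 0 - (PySem.List.pyGet? p 1).getD 0| = 1) &&
        ((PySem.List.pyGet? p 0).getD 0 == i))) := by
  induction L generalizing d with
  | nil => simp
  | cons p t ih =>
    simp only [List.foldl_cons, List.any_cons, ih]
    by_cases hc : |(PySem.List.pyGet? p 0).getD 0 - (PySem.List.pyGet? p 1).getD 0| = 1
    · rw [if_pos hc, contains_insert']
      simp only [hc, decide_true, Bool.true_and, Bool.or_assoc]
    · simp [hc]


lemma two_mul_sum_pyRange (j : Nat) :
    2 * ((PySem.List.pyRange 1 ((j : Int) + 1) 1).foldl (fun sum i => sum + i) 0) = (j : Int) * (j + 1) := by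
  induction j with
  | zero => decide
  | succ k ih =>
    have h : (1 : Int) ≤ (k : Int) + 1 := by omega
    have hc : ((k + 1 : Nat) : Int) + 1 = ((k : Int) + 1) + 1 := by push_cast; ring
    rw [hc, PySem.List.pyRange_one_succ_right h, List.foldl_append]
    simp only [List.foldl_cons, List.foldl_nil]
    push_cast
    nlinarith [ih]

lemma sumTill_closed (j : Nat) :
    sumTill (j : Int) = PySem.Int.floordiv ((j : Int) * ((j : Int) + 1)) 2 := by
  have h2 := two_mul_sum_pyRange j
  refine ((PySem.Int.floordiv_eq_iff_of_pos (by omega)).mpr ?_).symm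
  unfold sumTill
  constructor <;> nlinarith [h2]


-- the two ports agree on every input (the precondition only marks where the Python raises)
lemma optimizeTikTokRoutes_eq_alt (n : Int) (L : List (List Int)) :
    optimizeTikTokRoutes n L = optimizeTikTokRoutes_alt n L := by
  unfold optimizeTikTokRoutes optimizeTikTokRoutes_alt
  simp only []
  set g0 : List Int → Int := fun p => (PySem.List.pyGet? p 0).getD 0 with hg0
  set r := PySem.List.pyRange 1 (n + 1) 1 with hr
  set F : Int → Bool := fun i => L.any (fun p =>
        decide (|(PySem.List.pyGet? p 0).getD 0 - (PySem.List.pyGet? p 1).getD 0| = 1) &&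
        ((PySem.List.pyGet? p 0).getD 0 == i)) with hF
  set blocked : List Int := PySem.Set.ofList
    ((L.filter (fun p =>
        decide (|(PySem.List.pyGet? p 0).getD 0 - (PySem.List.pyGet? p 1).getD 0| = 1) &&
        decide (1 ≤ (PySem.List.pyGet? p 0).getD 0) &&
        decide ((PySem.List.pyGet? p 0).getD 0 ≤ n))).map
      (fun p => (PySem.List.pyGet? p 0).getD 0)) with hblocked
  -- the dict-membership test is F
  have hcont : ∀ i : Int, ((L.foldl (fun serverDict pair =>
      if |(PySem.List.pyGet? pair 0).getD 0 - (PySem.List.pyGet? pair 1).getD 0| = 1 then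
        serverDict.insert ((PySem.List.pyGet? pair 0).getD 0) ((PySem.List.pyGet? pair 1).getD 0)
      else serverDict) PySem.Dict.empty).contains i) = F i := by
    intro i
    rw [contains_foldl]
    have he : (PySem.Dict.empty : PySem.Dict Int Int).contains i = false := rfl
    rw [he, Bool.false_or]
  -- A's list is a filter of the range
  have hlst : ((PySem.List.pyRange 1 (n + 1) 1).foldl (fun lst i =>
      if !((L.foldl (fun serverDict pair =>
        if |(PySem.List.pyGet? pair 0).getD 0 - (PySem.List.pyGet? pair 1).getD 0| = 1 then
          serverDict.insert ((PySem.List.pyGet? pair 0).getD 0) ((PySem.List.pyGet? pair 1).getD 0)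
        else serverDict) PySem.Dict.empty).contains i) then lst ++ [[i]] else lst) [])
      = (r.filter (fun i => !(F i))).map (fun i => [i]) := by
    rw [PySem.List.foldl_append_if]
    simp only [List.nil_append, ← hr]
    congr 1
    apply List.filter_congr
    intro x _
    rw [hcont]
  rw [hlst]
  -- F agrees with membership in blocked, on the range
  have hFmem : ∀ i ∈ r, F i = decide (i ∈ blocked) := by
    intro i hi
    rw [PySem.List.mem_pyRange_one] at hi
    have : (F i = true) ↔ (i ∈ blocked) := by
      rw [hF, hblocked]
      simp only [List.any_eq_true, PySem.Set.mem_ofList, List.mem_map, List.mem_filter,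
        Bool.and_eq_true, beq_iff_eq, decide_eq_true_eq, and_assoc]
      constructor
      · rintro ⟨p, hp, hc, he⟩
        subst he
        exact ⟨p, hp, hc, by omega, by omega, rfl⟩
      · rintro ⟨p, hp, hc, h1, h2, he⟩
        exact ⟨p, hp, hc, he⟩
    rw [Bool.eq_iff_iff]
    simpa using this
  -- counting
  have hperm : (r.filter F).Perm blocked := by
    have h1 : (r.filter F) = r.filter (fun i => decide (i ∈ blocked)) :=
      List.filter_congr hFmem
    rw [h1]
    refine (List.perm_ext_iff_of_nodup (List.Nodup.filter _ (PySem.List.nodup_pyRange_one _ _))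
      (PySem.Set.nodup_ofList _)).mpr ?_
    intro a
    simp only [List.mem_filter, decide_eq_true_eq]
    rw [← hblocked]
    constructor
    · rintro ⟨_, h⟩; exact h
    · intro ha
      refine ⟨?_, ha⟩
      rw [PySem.List.mem_pyRange_one]
      rw [hblocked] at ha
      rcases (PySem.Set.mem_ofList _ _).mp ha with hm
      simp only [List.mem_map, List.mem_filter, Bool.and_eq_true, decide_eq_true_eq] at hm
      rcases hm with ⟨p, ⟨_, ⟨_, h1⟩, h2⟩, he⟩
      omega
  have hsplit : r.length = (r.filter F).length + (r.filter (fun a => !F a)).length :=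
    List.length_eq_length_filter_add F
  have hlen : (r.length : Int) = max n 0 := by
    rw [hr, PySem.List.length_pyRange_one]
    omega
  have hk : ((r.filter (fun i => !(F i))).length : Int)
      = max n 0 - (blocked.length : Int) := by
    have hb : (r.filter F).length = blocked.length := hperm.length_eq
    omega
  rw [List.length_map, sumTill_closed, hk]

-- ===== VERDICT (by name: the statement is the Claim_ definition above) =====
theorem optimizeTikTokRoutes_spec : Claim_equal_optimizeTikTokRoutes := by
  intro numServers disconnectedPairs _ _
  unfold Spec_optimizeTikTokRoutes
  exact optimizeTikTokRoutes_eq_alt numServers disconnectedPairs
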